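-- pv_equiv track=rewrite | github.com/AscencioSIUU/sets-MateDiscreta | src/operations.py | complemento
-- ===== SOURCE A (Python) =====
-- def universo():
--     abecedario_mayusculas = [chr(i) for i in range(ord('A'), ord('Z') + 1)]
--     numeros_0_9 = [str(i) for i in range(10)]
--     return abecedario_mayusculas + numeros_0_9
--
-- def complemento(conjunto):
--     universo_completo = universo()
--     complemento_resultado = []
--
--     # Calcular el complemento
--     for elemento_universo in universo_completo:
--         encontrado = False
--         for elemento_conjunto in conjunto:
--             if elemento_universo == elemento_conjunto:
--                 encontrado = True
--                 break
--         if not encontrado: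
--             complemento_resultado.append(elemento_universo)
--
--     return complemento_resultado
-- ===== SOURCE B (Python) =====
-- def universo():
--     abecedario_mayusculas = [chr(i) for i in range(ord('A'), ord('Z') + 1)]
--     numeros_0_9 = [str(i) for i in range(10)]
--     return abecedario_mayusculas + numeros_0_9
--
-- def complemento(conjunto):
--     resultado = universo()
--     for elemento in conjunto:
--         if elemento in resultado:
--             resultado.remove(elemento)
--     return resultado
-- ===== Notes on version B (the rewrite author's own statement) =====
-- stated objective: alternative
-- what changed: B flips the pass shape: instead of scanning the 36-element universe with an inner Python loop over conjunto for each element, B starts from a full copy of the universe and deletes each element of conjunto from that shrinking list, keeping universe order.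
import Mathlib
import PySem

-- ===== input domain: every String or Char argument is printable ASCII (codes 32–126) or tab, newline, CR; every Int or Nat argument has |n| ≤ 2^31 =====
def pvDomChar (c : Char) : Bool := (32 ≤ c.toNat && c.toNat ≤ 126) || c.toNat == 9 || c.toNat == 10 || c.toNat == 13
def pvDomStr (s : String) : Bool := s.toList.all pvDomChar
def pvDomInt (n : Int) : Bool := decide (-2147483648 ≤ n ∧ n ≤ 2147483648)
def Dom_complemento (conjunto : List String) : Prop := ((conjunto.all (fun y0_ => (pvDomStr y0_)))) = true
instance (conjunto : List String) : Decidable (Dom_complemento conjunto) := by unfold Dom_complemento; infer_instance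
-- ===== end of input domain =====

-- B replaces A's universe-scan-with-inner-membership-loop by a shrinking copy of the
-- universe from which each element of conjunto is removed; same return value, no speed claim.

-- ===== PORT A =====
-- shared helper: Python's universo() (chr over range(ord('A'), ord('Z')+1) ++ str(i) for i in range(10))
def universoL : List String :=
  ((PySem.List.pyRange 65 91 1).map (fun i => String.singleton (Char.ofNat i.toNat)))
    ++ ((PySem.List.pyRange 0 10 1).map PySem.Int.toStr)

-- A's inner 'for elemento_conjunto in conjunto: … break' loop computing 'encontrado'
def encontradoLoop (u : String) : List String → Bool
  | [] => false
  | c :: rest => if u == c then true else encontradoLoop u rest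

def complemento (conjunto : List String) : List String :=
  universoL.foldl
    (fun acc u => if !(encontradoLoop u conjunto) then acc ++ [u] else acc) []

-- ===== PORT B =====
def complemento_alt (conjunto : List String) : List String :=
  conjunto.foldl
    (fun res e => if res.contains e then res.erase e else res) universoL

-- ===== PRECONDITION & SPEC =====
def Spec_complemento (conjunto : List String) (out : List String) : Prop := out = complemento_alt conjunto
instance (conjunto : List String) (out : List String) : Decidable (Spec_complemento conjunto out) := by unfold Spec_complemento; infer_instance

-- ===== CLAIM (what is proved, stated in full; the proofs are below) =====
def Claim_equal_complemento : Prop := ∀ (conjunto : List String), Dom_complemento conjunto → Spec_complemento conjunto (complemento conjunto)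

-- ===== LEMMAS AND PROOFS =====

theorem encontradoLoop_eq_contains (u : String) (cs : List String) :
    encontradoLoop u cs = cs.contains u := by
  induction cs with
  | nil => simp [encontradoLoop]
  | cons c rest ih =>
      simp only [encontradoLoop, ih, List.contains_cons]
      by_cases h : u == c <;> simp [h]

theorem complemento_eq_filter (conjunto : List String) :
    complemento conjunto = universoL.filter (fun u => !conjunto.contains u) := by
  unfold complemento
  rw [show (fun (acc : List String) (u : String) =>
        if !(encontradoLoop u conjunto) then acc ++ [u] else acc)
      = (fun acc u => if (fun v => !conjunto.contains v) u then acc ++ [u] else acc) by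
    funext acc u; rw [encontradoLoop_eq_contains]]
  rw [PySem.List.foldl_append_if_eq_filter]
  simp

theorem foldl_erase_eq_filter (cs : List String) (res : List String) (h : res.Nodup) :
    cs.foldl (fun res e => if res.contains e then res.erase e else res) res
      = res.filter (fun u => !cs.contains u) := by
  induction cs generalizing res with
  | nil => simp
  | cons e rest ih =>
      have hstep : (if res.contains e then res.erase e else res)
          = res.filter (fun u => !(u == e)) := by
        by_cases hc : res.contains e
        · simp only [hc, if_true]
          rw [h.erase_eq_filter]
          simp [bne]
        · rw [if_neg hc]
          symm
          apply List.filter_eq_self.mpr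
          intro a ha
          simp only [Bool.not_eq_eq_eq_not, Bool.not_true, beq_eq_false_iff_ne]
          intro heq
          exact hc (by simpa [heq] using List.elem_iff.mpr ha)
      rw [List.foldl_cons, hstep, ih _ (h.filter _), List.filter_filter]
      apply List.filter_congr
      intro a _
      simp only [List.contains_cons, Bool.not_or]
      rw [Bool.and_comm]

theorem universoL_nodup : universoL.Nodup := by decide

-- ===== VERDICT (by name: the statement is the Claim_ definition above) =====
theorem complemento_spec : Claim_equal_complemento := by
  intro conjunto _
  unfold Spec_complemento complemento_alt
  rw [complemento_eq_filter, foldl_erase_eq_filter conjunto universoL universoL_nodup]
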